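-- pv_equiv track=rewrite | github.com/BASE-Laboratory/BraggTrack | braggtrack/segmentation/postprocess.py | fill_holes_binary
-- ===== SOURCE A (Python) =====
-- from collections import deque
--
-- def fill_holes_binary(mask: list[list[list[bool]]]) -> list[list[list[bool]]]:
--     """Fill enclosed holes by flood-filling background from boundaries."""
--
--     z_max = len(mask)
--     y_max = len(mask[0]) if z_max else 0
--     x_max = len(mask[0][0]) if y_max else 0
--
--     outside = [[[False for _ in range(x_max)] for _ in range(y_max)] for _ in range(z_max)]
--     q: deque[tuple[int, int, int]] = deque()
--
--     def push_if_bg(z: int, y: int, x: int) -> None: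
--         if 0 <= z < z_max and 0 <= y < y_max and 0 <= x < x_max:
--             if (not mask[z][y][x]) and (not outside[z][y][x]):
--                 outside[z][y][x] = True
--                 q.append((z, y, x))
--
--     for z in range(z_max):
--         for y in range(y_max):
--             push_if_bg(z, y, 0)
--             push_if_bg(z, y, x_max - 1)
--         for x in range(x_max):
--             push_if_bg(z, 0, x)
--             push_if_bg(z, y_max - 1, x)
--     for y in range(y_max):
--         for x in range(x_max):
--             push_if_bg(0, y, x)
--             push_if_bg(z_max - 1, y, x)
--
--     while q:
--         z, y, x = q.popleft()
--         for nz, ny, nx in ((z - 1, y, x), (z + 1, y, x), (z, y - 1, x), (z, y + 1, x), (z, y, x - 1), (z, y, x + 1)):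
--             if 0 <= nz < z_max and 0 <= ny < y_max and 0 <= nx < x_max:
--                 if (not mask[nz][ny][nx]) and (not outside[nz][ny][nx]):
--                     outside[nz][ny][nx] = True
--                     q.append((nz, ny, nx))
--
--     filled = [[[mask[z][y][x] or (not outside[z][y][x]) for x in range(x_max)] for y in range(y_max)] for z in range(z_max)]
--     return filled
-- ===== SOURCE B (Python) =====
-- def fill_holes_binary(mask: list[list[list[bool]]]) -> list[list[list[bool]]]:
--     """Fill enclosed holes: saturate an 'outside' grid by repeated sweeps
--     (fixpoint iteration) instead of a BFS worklist."""
--     z_max = len(mask)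
--     y_max = len(mask[0]) if z_max else 0
--     x_max = len(mask[0][0]) if y_max else 0
--
--     def bg(z: int, y: int, x: int) -> bool:
--         return not mask[z][y][x]
--
--     # seed: every background voxel on a face of the volume is outside
--     outside = [[[bg(z, y, x) and (z == 0 or z == z_max - 1 or y == 0
--                                   or y == y_max - 1 or x == 0 or x == x_max - 1)
--                  for x in range(x_max)] for y in range(y_max)] for z in range(z_max)]
--
--     # propagate: sweep until no voxel changes
--     while True:
--         new = [[[outside[z][y][x] or (bg(z, y, x) and (
--                     (z > 0 and outside[z - 1][y][x]) or
--                     (z + 1 < z_max and outside[z + 1][y][x]) or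
--                     (y > 0 and outside[z][y - 1][x]) or
--                     (y + 1 < y_max and outside[z][y + 1][x]) or
--                     (x > 0 and outside[z][y][x - 1]) or
--                     (x + 1 < x_max and outside[z][y][x + 1])))
--                  for x in range(x_max)] for y in range(y_max)] for z in range(z_max)]
--         if new == outside:
--             break
--         outside = new
--
--     return [[[mask[z][y][x] or not outside[z][y][x]
--               for x in range(x_max)] for y in range(y_max)] for z in range(z_max)]
-- ===== Notes on version B (the rewrite author's own statement) =====
-- stated objective: alternative
-- what changed: Replaces A's deque-based BFS flood fill (seed boundary background cells into a queue, pop and expand neighbours) by fixpoint iteration: seed every boundary background voxel at once, then sweep the whole grid repeatedly, switching a voxel to 'outside' when any 6-neighbour is outside, until a sweep changes nothing.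
import Mathlib
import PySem

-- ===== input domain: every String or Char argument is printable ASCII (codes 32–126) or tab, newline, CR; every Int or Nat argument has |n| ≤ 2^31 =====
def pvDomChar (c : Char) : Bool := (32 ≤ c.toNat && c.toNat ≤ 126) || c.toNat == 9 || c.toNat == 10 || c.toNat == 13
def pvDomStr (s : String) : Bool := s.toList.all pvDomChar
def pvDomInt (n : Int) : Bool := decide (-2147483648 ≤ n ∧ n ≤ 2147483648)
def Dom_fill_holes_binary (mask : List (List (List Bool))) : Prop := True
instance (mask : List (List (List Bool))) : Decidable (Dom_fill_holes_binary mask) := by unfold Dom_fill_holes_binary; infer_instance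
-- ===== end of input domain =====

-- B replaces A's seeded BFS worklist (deque + visited grid) by fixpoint iteration:
-- seed all boundary background voxels at once, then sweep the whole grid until stable.
-- Objective: alternative algorithm/decomposition, same exact result.

-- shared small helpers (3-D grid access, both Pythons index nested lists the same way)
def pvGet3 (g : List (List (List Bool))) (z y x : ℕ) : Bool :=
  ((g.getD z []).getD y []).getD x false

def pvMk (Z Y X : ℕ) (f : ℕ → ℕ → ℕ → Bool) : List (List (List Bool)) :=
  (List.range Z).map fun z => (List.range Y).map fun y => (List.range X).map fun x => f z y x

def pvDimY (mask : List (List (List Bool))) : ℕ :=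
  if mask.length ≠ 0 then (mask.getD 0 []).length else 0

def pvDimX (mask : List (List (List Bool))) : ℕ :=
  if pvDimY mask ≠ 0 then ((mask.getD 0 []).getD 0 []).length else 0

-- ===== PORT A =====  (seed boundary background cells into a deque, BFS flood fill)

def pvSet3 (g : List (List (List Bool))) (z y x : ℕ) (v : Bool) : List (List (List Bool)) :=
  g.set z ((g.getD z []).set y (((g.getD z []).getD y []).set x v))

-- push_if_bg: bounds check on Int coordinates, then mark + append if background and unmarked
def pvPush (mask : List (List (List Bool))) (Z Y X : ℕ) (c : ℤ × ℤ × ℤ)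
    (st : List (List (List Bool)) × List (ℕ × ℕ × ℕ)) :
    List (List (List Bool)) × List (ℕ × ℕ × ℕ) :=
  if 0 ≤ c.1 ∧ c.1 < (Z : ℤ) ∧ 0 ≤ c.2.1 ∧ c.2.1 < (Y : ℤ) ∧ 0 ≤ c.2.2 ∧ c.2.2 < (X : ℤ) then
    if pvGet3 mask c.1.toNat c.2.1.toNat c.2.2.toNat = false ∧
        pvGet3 st.1 c.1.toNat c.2.1.toNat c.2.2.toNat = false then
      (pvSet3 st.1 c.1.toNat c.2.1.toNat c.2.2.toNat true,
       st.2 ++ [(c.1.toNat, c.2.1.toNat, c.2.2.toNat)])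
    else st
  else st

-- the coordinates Python's three seeding for-loops call push_if_bg on, in order
def pvSeedCalls (Z Y X : ℕ) : List (ℤ × ℤ × ℤ) :=
  ((List.range Z).flatMap fun (z : ℕ) =>
    ((List.range Y).flatMap fun (y : ℕ) =>
      [((z : ℤ), (y : ℤ), (0 : ℤ)), ((z : ℤ), (y : ℤ), (X : ℤ) - 1)]) ++
    ((List.range X).flatMap fun (x : ℕ) =>
      [((z : ℤ), (0 : ℤ), (x : ℤ)), ((z : ℤ), (Y : ℤ) - 1, (x : ℤ))])) ++
  ((List.range Y).flatMap fun (y : ℕ) =>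
    (List.range X).flatMap fun (x : ℕ) =>
      [((0 : ℤ), (y : ℤ), (x : ℤ)), ((Z : ℤ) - 1, (y : ℤ), (x : ℤ))])

def pvNbrs (c : ℕ × ℕ × ℕ) : List (ℤ × ℤ × ℤ) :=
  [((c.1 : ℤ) - 1, (c.2.1 : ℤ), (c.2.2 : ℤ)), ((c.1 : ℤ) + 1, (c.2.1 : ℤ), (c.2.2 : ℤ)),
   ((c.1 : ℤ), (c.2.1 : ℤ) - 1, (c.2.2 : ℤ)), ((c.1 : ℤ), (c.2.1 : ℤ) + 1, (c.2.2 : ℤ)),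
   ((c.1 : ℤ), (c.2.1 : ℤ), (c.2.2 : ℤ) - 1), ((c.1 : ℤ), (c.2.1 : ℤ), (c.2.2 : ℤ) + 1)]

-- while q: pop left, push the six neighbours (fuel only makes the loop total;
-- pvBfs_measure below shows the chosen fuel always suffices)
def pvBfs (mask : List (List (List Bool))) (Z Y X : ℕ) :
    ℕ → List (List (List Bool)) × List (ℕ × ℕ × ℕ) → List (List (List Bool))
  | 0, st => st.1
  | _ + 1, (o, []) => o
  | f + 1, (o, c :: rest) =>
      pvBfs mask Z Y X f ((pvNbrs c).foldl (fun s n => pvPush mask Z Y X n s) (o, rest))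

def pvOutA (mask : List (List (List Bool))) : List (List (List Bool)) :=
  let Z := mask.length; let Y := pvDimY mask; let X := pvDimX mask
  let st := (pvSeedCalls Z Y X).foldl (fun s c => pvPush mask Z Y X c s)
              (pvMk Z Y X fun _ _ _ => false, [])
  pvBfs mask Z Y X (st.2.length + Z * Y * X + 1) st

def fill_holes_binary (mask : List (List (List Bool))) : List (List (List Bool)) :=
  let Z := mask.length; let Y := pvDimY mask; let X := pvDimX mask
  let o := pvOutA mask
  pvMk Z Y X fun z y x => pvGet3 mask z y x || !pvGet3 o z y x

-- ===== PORT B =====  (seed whole boundary at once, sweep to a fixpoint)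

def pvStep (mask : List (List (List Bool))) (Z Y X : ℕ) (o : List (List (List Bool))) :
    List (List (List Bool)) :=
  pvMk Z Y X fun z y x =>
    pvGet3 o z y x || (!pvGet3 mask z y x &&
      ((decide (0 < z) && pvGet3 o (z - 1) y x) ||
       (decide (z + 1 < Z) && pvGet3 o (z + 1) y x) ||
       (decide (0 < y) && pvGet3 o z (y - 1) x) ||
       (decide (y + 1 < Y) && pvGet3 o z (y + 1) x) ||
       (decide (0 < x) && pvGet3 o z y (x - 1)) ||
       (decide (x + 1 < X) && pvGet3 o z y (x + 1))))

-- while True: new = sweep; stop when unchanged (fuel only makes the loop total;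
-- pvLoop_fix below shows the chosen fuel always suffices)
def pvLoopB (mask : List (List (List Bool))) (Z Y X : ℕ) :
    ℕ → List (List (List Bool)) → List (List (List Bool))
  | 0, o => o
  | f + 1, o =>
      let n := pvStep mask Z Y X o
      if n = o then o else pvLoopB mask Z Y X f n

def pvOutB (mask : List (List (List Bool))) : List (List (List Bool)) :=
  let Z := mask.length; let Y := pvDimY mask; let X := pvDimX mask
  let seedG := pvMk Z Y X fun z y x =>
    !pvGet3 mask z y x &&
      (z == 0 || z == Z - 1 || y == 0 || y == Y - 1 || x == 0 || x == X - 1)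
  pvLoopB mask Z Y X (Z * Y * X + 1) seedG

def fill_holes_binary_alt (mask : List (List (List Bool))) : List (List (List Bool)) :=
  let Z := mask.length; let Y := pvDimY mask; let X := pvDimX mask
  let o := pvOutB mask
  pvMk Z Y X fun z y x => pvGet3 mask z y x || !pvGet3 o z y x

-- ===== PRECONDITION & SPEC =====
-- Pre_ excludes exactly the ragged masks on which Python A raises IndexError:
-- when the dimensions read off mask[0] / mask[0][0] are nonzero, every plane must
-- have at least pvDimY rows and each of its first pvDimY rows at least pvDimX
-- entries (if pvDimX = 0, Python never indexes into the planes and cannot raise).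
def Pre_fill_holes_binary (mask : List (List (List Bool))) : Prop :=
  pvDimX mask = 0 ∨ ∀ p ∈ mask, pvDimY mask ≤ p.length ∧
    ∀ y ∈ List.range (pvDimY mask), pvDimX mask ≤ (p.getD y []).length

instance (mask : List (List (List Bool))) : Decidable (Pre_fill_holes_binary mask) := by
  unfold Pre_fill_holes_binary; infer_instance

def pvWitness_fill_holes_binary : List (List (List Bool)) := [[[true, true], [true, false]]]

def Spec_fill_holes_binary (mask : List (List (List Bool))) (out : List (List (List Bool))) : Prop := out = fill_holes_binary_alt mask
instance (mask : List (List (List Bool))) (out : List (List (List Bool))) : Decidable (Spec_fill_holes_binary mask out) := by unfold Spec_fill_holes_binary; infer_instance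

-- ===== CLAIM (what is proved, stated in full; the proofs are below) =====
def Claim_equal_fill_holes_binary : Prop := ∀ (mask : List (List (List Bool))), Dom_fill_holes_binary mask → Pre_fill_holes_binary mask → Spec_fill_holes_binary mask (fill_holes_binary mask)

-- ===== LEMMAS AND PROOFS =====

-- abstract vocabulary: in-bounds points, 6-adjacency, boundary seeds, closed marking
def pvInB (Z Y X : ℕ) (p : ℕ × ℕ × ℕ) : Prop := p.1 < Z ∧ p.2.1 < Y ∧ p.2.2 < X

def pvAdj (p q : ℕ × ℕ × ℕ) : Prop :=
  (p.1 = q.1 ∧ p.2.1 = q.2.1 ∧ (p.2.2 + 1 = q.2.2 ∨ q.2.2 + 1 = p.2.2)) ∨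
  (p.1 = q.1 ∧ p.2.2 = q.2.2 ∧ (p.2.1 + 1 = q.2.1 ∨ q.2.1 + 1 = p.2.1)) ∨
  (p.2.1 = q.2.1 ∧ p.2.2 = q.2.2 ∧ (p.1 + 1 = q.1 ∨ q.1 + 1 = p.1))

def pvBg (mask : List (List (List Bool))) (p : ℕ × ℕ × ℕ) : Prop :=
  pvGet3 mask p.1 p.2.1 p.2.2 = false

def pvSeedP (mask : List (List (List Bool))) (Z Y X : ℕ) (p : ℕ × ℕ × ℕ) : Prop :=
  pvInB Z Y X p ∧ pvBg mask p ∧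
    (p.1 = 0 ∨ p.1 = Z - 1 ∨ p.2.1 = 0 ∨ p.2.1 = Y - 1 ∨ p.2.2 = 0 ∨ p.2.2 = X - 1)

def pvClosed (mask : List (List (List Bool))) (Z Y X : ℕ) (T : ℕ × ℕ × ℕ → Bool) : Prop :=
  (∀ p, pvSeedP mask Z Y X p → T p = true) ∧
  (∀ p q, pvInB Z Y X p → pvBg mask p → pvAdj p q → T q = true → T p = true)

def pvShape (g : List (List (List Bool))) (Z Y X : ℕ) : Prop :=
  g.length = Z ∧ ∀ p ∈ g, p.length = Y ∧ ∀ r ∈ p, r.length = X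

def pvFalseCount (g : List (List (List Bool))) : ℕ :=
  (g.map fun p => (p.map fun r => r.count false).sum).sum

def pvToN (c : ℤ × ℤ × ℤ) : ℕ × ℕ × ℕ := (c.1.toNat, c.2.1.toNat, c.2.2.toNat)

def pvValid (Z Y X : ℕ) (c : ℤ × ℤ × ℤ) : Prop :=
  0 ≤ c.1 ∧ c.1 < (Z : ℤ) ∧ 0 ≤ c.2.1 ∧ c.2.1 < (Y : ℤ) ∧ 0 ≤ c.2.2 ∧ c.2.2 < (X : ℤ)

-- grid lemmas
theorem pvGetD_mem {α : Type} (g : List α) (z : ℕ) (d : α) (h : z < g.length) : g.getD z d ∈ g := by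
  rw [List.getD_eq_getElem _ _ h]; exact List.getElem_mem h

theorem pvGetD_set_self {α : Type} (g : List α) (z : ℕ) (d : α) (v : α) (h : z < g.length) :
    (g.set z v).getD z d = v := by
  rw [List.getD_eq_getElem?_getD, List.getElem?_set_self h]; rfl

theorem pvGetD_set_ne {α : Type} (g : List α) (z z' : ℕ) (d : α) (v : α) (h : z ≠ z') :
    (g.set z v).getD z' d = g.getD z' d := by
  rw [List.getD_eq_getElem?_getD, List.getElem?_set_ne h, ← List.getD_eq_getElem?_getD]

theorem pvGet3_mk (Z Y X : ℕ) (f : ℕ → ℕ → ℕ → Bool) (z y x : ℕ) :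
    pvGet3 (pvMk Z Y X f) z y x = if z < Z ∧ y < Y ∧ x < X then f z y x else false := by
  unfold pvGet3 pvMk
  by_cases hz : z < Z
  · by_cases hy : y < Y
    · by_cases hx : x < X
      · simp [List.getD_eq_getElem?_getD, hz, hy, hx]
      · simp [List.getD_eq_getElem?_getD, hz, hy, hx]
    · simp [List.getD_eq_getElem?_getD, hz, hy]
  · simp [List.getD_eq_getElem?_getD, hz]

theorem pvShape_mk (Z Y X : ℕ) (f : ℕ → ℕ → ℕ → Bool) : pvShape (pvMk Z Y X f) Z Y X := by
  refine ⟨by simp [pvMk], ?_⟩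
  intro p hp
  simp only [pvMk, List.mem_map, List.mem_range] at hp
  obtain ⟨z, hz, rfl⟩ := hp
  refine ⟨by simp, ?_⟩
  intro r hr
  simp only [List.mem_map, List.mem_range] at hr
  obtain ⟨y, hy, rfl⟩ := hr
  simp

theorem pvGet3_true_inB (g : List (List (List Bool))) (Z Y X z y x : ℕ)
    (hs : pvShape g Z Y X) (h : pvGet3 g z y x = true) : pvInB Z Y X (z, y, x) := by
  obtain ⟨hZ, hrest⟩ := hs
  unfold pvGet3 at h
  by_cases hz : z < g.length
  · obtain ⟨hY, hrows⟩ := hrest _ (pvGetD_mem g z [] hz)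
    by_cases hy : y < (g.getD z []).length
    · have hX := hrows _ (pvGetD_mem _ y [] hy)
      by_cases hx : x < ((g.getD z []).getD y []).length
      · exact ⟨hZ ▸ hz, hY ▸ hy, hX ▸ hx⟩
      · rw [List.getD_eq_default ((g.getD z []).getD y []) false (by omega)] at h; simp at h
    · rw [List.getD_eq_default (g.getD z []) ([] : List Bool) (by omega)] at h; simp at h
  · rw [List.getD_eq_default g ([] : List (List Bool)) (by omega)] at h; simp at h

theorem pvShape_set3 (g : List (List (List Bool))) (Z Y X z y x : ℕ) (v : Bool)
    (hs : pvShape g Z Y X) : pvShape (pvSet3 g z y x v) Z Y X := by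
  obtain ⟨hZ, hrest⟩ := hs
  refine ⟨by simpa [pvSet3], ?_⟩
  intro p hp
  unfold pvSet3 at hp
  by_cases hz : z < g.length
  · obtain ⟨hY, hrows⟩ := hrest _ (pvGetD_mem g z [] hz)
    by_cases hy : y < (g.getD z []).length
    · rcases List.mem_or_eq_of_mem_set hp with hp | rfl
      · exact hrest _ hp
      · refine ⟨by simpa, ?_⟩
        intro r hr
        rcases List.mem_or_eq_of_mem_set hr with hr | rfl
        · exact hrows _ hr
        · simpa using hrows _ (pvGetD_mem _ y [] hy)
    · rw [List.set_eq_of_length_le (l := g.getD z []) (by omega)] at hp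
      rcases List.mem_or_eq_of_mem_set hp with hp | rfl
      · exact hrest _ hp
      · exact hrest _ (pvGetD_mem g z [] hz)
  · rw [List.set_eq_of_length_le (l := g) (by omega)] at hp
    exact hrest _ hp

theorem pvGet3_set3_self (g : List (List (List Bool))) (Z Y X z y x : ℕ) (v : Bool)
    (hs : pvShape g Z Y X) (hz : z < Z) (hy : y < Y) (hx : x < X) :
    pvGet3 (pvSet3 g z y x v) z y x = v := by
  obtain ⟨hZ, hrest⟩ := hs
  have hzl : z < g.length := by omega
  obtain ⟨hY, hrows⟩ := hrest _ (pvGetD_mem g z [] hzl)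
  have hyl : y < (g.getD z []).length := by omega
  have hX := hrows _ (pvGetD_mem _ y [] hyl)
  have hxl : x < ((g.getD z []).getD y []).length := by omega
  unfold pvGet3 pvSet3
  rw [pvGetD_set_self _ _ _ _ hzl, pvGetD_set_self _ _ _ _ hyl, pvGetD_set_self _ _ _ _ hxl]

theorem pvGet3_set3_ne (g : List (List (List Bool))) (z y x z' y' x' : ℕ) (v : Bool)
    (h : ¬(z = z' ∧ y = y' ∧ x = x')) :
    pvGet3 (pvSet3 g z y x v) z' y' x' = pvGet3 g z' y' x' := by
  unfold pvGet3 pvSet3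
  by_cases hz : z = z'
  · subst hz
    by_cases hzl : z < g.length
    · rw [pvGetD_set_self _ _ _ _ hzl]
      by_cases hy : y = y'
      · subst hy
        by_cases hyl : y < (g.getD z []).length
        · rw [pvGetD_set_self _ _ _ _ hyl]
          have hx : x ≠ x' := by tauto
          rw [pvGetD_set_ne _ _ _ _ _ hx]
        · rw [List.set_eq_of_length_le (l := g.getD z []) (by omega)]
      · rw [pvGetD_set_ne _ _ _ _ _ hy]
    · rw [List.set_eq_of_length_le (l := g) (by omega)]
  · rw [pvGetD_set_ne _ _ _ _ _ hz]

-- 1-D count lemmas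
theorem pvCount1_le (r r' : List Bool) (hlen : r.length = r'.length)
    (hle : ∀ i, i < r.length → r.getD i false = true → r'.getD i false = true) :
    r'.count false ≤ r.count false ∧ (r ≠ r' → r'.count false < r.count false) := by
  induction r generalizing r' with
  | nil => cases r' with
    | nil => simp
    | cons b t => simp at hlen
  | cons a t ih =>
    cases r' with
    | nil => simp at hlen
    | cons b t' =>
      have hab : a = true → b = true := by
        have := hle 0 (by simp)
        simpa using this
      have htail := ih t' (by simpa using hlen) (fun i hi h => by
        have := hle (i + 1) (by simpa using hi)
        simpa using this h)
      obtain ⟨hle', hlt'⟩ := htail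
      constructor
      · cases a <;> cases b <;> simp_all [List.count_cons] <;> omega
      · intro hne
        by_cases hteq : t = t'
        · subst hteq
          have hab' : a ≠ b := by intro h; exact hne (by rw [h])
          cases a <;> cases b <;> simp_all [List.count_cons]
        · have := hlt' hteq
          cases a <;> cases b <;> simp_all [List.count_cons] <;> omega

theorem pvCount2 (p p' : List (List Bool)) (X : ℕ)
    (hX : ∀ r ∈ p, r.length = X) (hX' : ∀ r ∈ p', r.length = X)
    (hlen : p.length = p'.length)
    (hle : ∀ y x, (p.getD y []).getD x false = true → (p'.getD y []).getD x false = true) :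
    (p'.map fun r => r.count false).sum ≤ (p.map fun r => r.count false).sum ∧
      (p ≠ p' → (p'.map fun r => r.count false).sum < (p.map fun r => r.count false).sum) := by
  induction p generalizing p' with
  | nil => cases p' with
    | nil => simp
    | cons b t => simp at hlen
  | cons r t ih =>
    cases p' with
    | nil => simp at hlen
    | cons r' t' =>
      have hhead := pvCount1_le r r' (by
          rw [hX r (by simp), hX' r' (by simp)])
        (fun i hi h => by have := hle 0 i; simp_all)
      have htail := ih t' (fun q hq => hX q (by simp [hq])) (fun q hq => hX' q (by simp [hq]))
        (by simpa using hlen) (fun y x h => by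
          have := hle (y + 1) x
          simp_all)
      obtain ⟨h1, h1s⟩ := hhead
      obtain ⟨h2, h2s⟩ := htail
      constructor
      · simp only [List.map_cons, List.sum_cons]; omega
      · intro hne
        simp only [List.map_cons, List.sum_cons]
        by_cases hr : r = r'
        · subst hr
          have : t ≠ t' := by intro h; exact hne (by rw [h])
          have := h2s this; omega
        · have := h1s hr; omega

theorem pvCount3 (g g' : List (List (List Bool))) (Y X : ℕ)
    (hsh : ∀ p ∈ g, p.length = Y ∧ ∀ r ∈ p, r.length = X)
    (hsh' : ∀ p ∈ g', p.length = Y ∧ ∀ r ∈ p, r.length = X)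
    (hlen : g.length = g'.length)
    (hle : ∀ z y x, pvGet3 g z y x = true → pvGet3 g' z y x = true) :
    pvFalseCount g' ≤ pvFalseCount g ∧ (g ≠ g' → pvFalseCount g' < pvFalseCount g) := by
  induction g generalizing g' with
  | nil => cases g' with
    | nil => simp
    | cons b t => simp at hlen
  | cons p t ih =>
    cases g' with
    | nil => simp at hlen
    | cons p' t' =>
      have hhead := pvCount2 p p' X (hsh p (by simp)).2 (hsh' p' (by simp)).2
        (by rw [(hsh p (by simp)).1, (hsh' p' (by simp)).1])
        (fun y x h => by have := hle 0 y x; simp_all [pvGet3])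
      have htail := ih t' (fun q hq => hsh q (by simp [hq])) (fun q hq => hsh' q (by simp [hq]))
        (by simpa using hlen) (fun z y x h => by
          have := hle (z + 1) y x
          simp_all [pvGet3])
      obtain ⟨h1, h1s⟩ := hhead
      obtain ⟨h2, h2s⟩ := htail
      constructor
      · simp only [pvFalseCount, List.map_cons, List.sum_cons] at *; omega
      · intro hne
        simp only [pvFalseCount, List.map_cons, List.sum_cons] at *
        by_cases hp : p = p'
        · subst hp
          have : t ≠ t' := by intro h; exact hne (by rw [h])
          have := h2s this; omega
        · have := h1s hp; omega

theorem pvFalseCount_le (g : List (List (List Bool))) (Z Y X : ℕ) (hs : pvShape g Z Y X) :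
    pvFalseCount g ≤ Z * Y * X := by
  obtain ⟨hZ, hrest⟩ := hs
  unfold pvFalseCount
  calc (g.map fun p => (p.map fun r => r.count false).sum).sum
      ≤ (g.map fun p => (p.map fun r => r.count false).sum).length • (Y * X) := by
        apply List.sum_le_card_nsmul
        intro v hv
        simp only [List.mem_map] at hv
        obtain ⟨p, hp, rfl⟩ := hv
        obtain ⟨hY, hrows⟩ := hrest p hp
        calc (p.map fun r => r.count false).sum
            ≤ (p.map fun r => r.count false).length • X := by
              apply List.sum_le_card_nsmul
              intro w hw
              simp only [List.mem_map] at hw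
              obtain ⟨r, hr, rfl⟩ := hw
              calc r.count false ≤ r.length := List.count_le_length
                _ = X := hrows r hr
          _ = Y * X := by simp [hY]
    _ = Z * (Y * X) := by simp [hZ]
    _ = Z * Y * X := by ring

theorem pvSumMap_set {α : Type} (l : List α) (i : ℕ) (a d : α) (f : α → ℕ) (h : i < l.length) :
    ((l.set i a).map f).sum + f (l.getD i d) = (l.map f).sum + f a := by
  induction l generalizing i with
  | nil => simp at h
  | cons b t ih =>
    cases i with
    | zero => simp [List.getD_cons_zero]; omega
    | succ j =>
      have := ih j (by simpa using h)
      simp only [List.set_cons_succ, List.map_cons, List.sum_cons, List.getD_cons_succ]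
      omega

theorem pvCount1_set (r : List Bool) (x : ℕ) (h : x < r.length) (hf : r.getD x false = false) :
    (r.set x true).count false + 1 = r.count false := by
  have hc := List.count_set (a := true) (b := false) (l := r) (i := x) h
  rw [List.getD_eq_getElem _ _ h] at hf
  have hmem : (false : Bool) ∈ r := hf ▸ List.getElem_mem h
  have hpos : 0 < r.count false := List.count_pos_iff.mpr hmem
  simp [hf] at hc
  omega

theorem pvFalseCount_set3 (g : List (List (List Bool))) (Z Y X z y x : ℕ)
    (hs : pvShape g Z Y X) (hz : z < Z) (hy : y < Y) (hx : x < X)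
    (h : pvGet3 g z y x = false) :
    pvFalseCount (pvSet3 g z y x true) + 1 = pvFalseCount g := by
  obtain ⟨hZ, hrest⟩ := hs
  have hzl : z < g.length := by omega
  obtain ⟨hY, hrows⟩ := hrest _ (pvGetD_mem g z [] hzl)
  have hyl : y < (g.getD z []).length := by omega
  have hX := hrows _ (pvGetD_mem _ y [] hyl)
  have hxl : x < ((g.getD z []).getD y []).length := by omega
  have hA := pvSumMap_set g z ((g.getD z []).set y (((g.getD z []).getD y []).set x true)) []
    (fun p => (p.map fun r => r.count false).sum) hzl
  have hB := pvSumMap_set (g.getD z []) y (((g.getD z []).getD y []).set x true) []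
    (fun r => r.count false) hyl
  have hC := pvCount1_set ((g.getD z []).getD y []) x hxl h
  simp only [pvFalseCount, pvSet3]
  simp only [List.map_map] at *
  omega

-- ===== B-side lemmas =====

theorem pvStep_mono (mask : List (List (List Bool))) (Z Y X : ℕ) (o : List (List (List Bool)))
    (hs : pvShape o Z Y X) (z y x : ℕ) (h : pvGet3 o z y x = true) :
    pvGet3 (pvStep mask Z Y X o) z y x = true := by
  have hin := pvGet3_true_inB o Z Y X z y x hs h
  obtain ⟨h1, h2, h3⟩ := hin
  unfold pvStep
  rw [pvGet3_mk]
  simp [h1, h2, h3, h]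

theorem pvLoopB_shape (mask : List (List (List Bool))) (Z Y X f : ℕ) (o : List (List (List Bool)))
    (hs : pvShape o Z Y X) : pvShape (pvLoopB mask Z Y X f o) Z Y X := by
  induction f generalizing o with
  | zero => exact hs
  | succ f ih =>
    simp only [pvLoopB]
    split
    · exact hs
    · exact ih _ (pvShape_mk Z Y X _)

theorem pvLoopB_mono (mask : List (List (List Bool))) (Z Y X f : ℕ) (o : List (List (List Bool)))
    (hs : pvShape o Z Y X) (z y x : ℕ) (h : pvGet3 o z y x = true) :
    pvGet3 (pvLoopB mask Z Y X f o) z y x = true := by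
  induction f generalizing o with
  | zero => exact h
  | succ f ih =>
    simp only [pvLoopB]
    split
    · exact h
    · exact ih _ (pvShape_mk Z Y X _) (pvStep_mono mask Z Y X o hs z y x h)

theorem pvLoopB_fix (mask : List (List (List Bool))) (Z Y X : ℕ) (f : ℕ)
    (o : List (List (List Bool))) (hs : pvShape o Z Y X) (hf : pvFalseCount o < f) :
    pvStep mask Z Y X (pvLoopB mask Z Y X f o) = pvLoopB mask Z Y X f o := by
  induction f generalizing o with
  | zero => omega
  | succ f ih =>
    simp only [pvLoopB]
    split
    · assumption
    · rename_i hne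
      have hsh' : pvShape (pvStep mask Z Y X o) Z Y X := pvShape_mk Z Y X _
      have hcnt := pvCount3 o (pvStep mask Z Y X o) Y X hs.2 hsh'.2
        (by simp only [pvStep, pvMk, List.length_map, List.length_range]; exact hs.1)
        (fun z y x hh => pvStep_mono mask Z Y X o hs z y x hh)
      exact ih (pvStep mask Z Y X o) hsh'
        (by have := hcnt.2 (fun he => hne he.symm); omega)
theorem pvStep_ub (mask : List (List (List Bool))) (Z Y X : ℕ) (o : List (List (List Bool)))
    (T : ℕ × ℕ × ℕ → Bool) (hcl : pvClosed mask Z Y X T)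
    (h : ∀ z y x, pvGet3 o z y x = true → T (z, y, x) = true) (z y x : ℕ)
    (hstep : pvGet3 (pvStep mask Z Y X o) z y x = true) : T (z, y, x) = true := by
  unfold pvStep at hstep
  rw [pvGet3_mk] at hstep
  by_cases hin : z < Z ∧ y < Y ∧ x < X
  · rw [if_pos hin] at hstep
    obtain ⟨h1, h2, h3⟩ := hin
    simp only [Bool.or_eq_true, Bool.and_eq_true, decide_eq_true_eq, Bool.not_eq_true'] at hstep
    rcases hstep with hh | ⟨hbg, hh⟩
    · exact h z y x hh
    · rcases hh with (((((⟨hc, hg⟩ | ⟨hc, hg⟩) | ⟨hc, hg⟩) | ⟨hc, hg⟩) | ⟨hc, hg⟩) | ⟨hc, hg⟩)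
      · exact hcl.2 (z, y, x) (z - 1, y, x) ⟨h1, h2, h3⟩ hbg (by unfold pvAdj; dsimp only; omega)
          (h _ _ _ hg)
      · exact hcl.2 (z, y, x) (z + 1, y, x) ⟨h1, h2, h3⟩ hbg (by unfold pvAdj; dsimp only; omega)
          (h _ _ _ hg)
      · exact hcl.2 (z, y, x) (z, y - 1, x) ⟨h1, h2, h3⟩ hbg (by unfold pvAdj; dsimp only; omega)
          (h _ _ _ hg)
      · exact hcl.2 (z, y, x) (z, y + 1, x) ⟨h1, h2, h3⟩ hbg (by unfold pvAdj; dsimp only; omega)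
          (h _ _ _ hg)
      · exact hcl.2 (z, y, x) (z, y, x - 1) ⟨h1, h2, h3⟩ hbg (by unfold pvAdj; dsimp only; omega)
          (h _ _ _ hg)
      · exact hcl.2 (z, y, x) (z, y, x + 1) ⟨h1, h2, h3⟩ hbg (by unfold pvAdj; dsimp only; omega)
          (h _ _ _ hg)
  · rw [if_neg hin] at hstep
    simp at hstep
theorem pvLoopB_ub (mask : List (List (List Bool))) (Z Y X f : ℕ) (o : List (List (List Bool)))
    (T : ℕ × ℕ × ℕ → Bool) (hcl : pvClosed mask Z Y X T)
    (h : ∀ z y x, pvGet3 o z y x = true → T (z, y, x) = true) (z y x : ℕ)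
    (hres : pvGet3 (pvLoopB mask Z Y X f o) z y x = true) : T (z, y, x) = true := by
  induction f generalizing o with
  | zero => exact h z y x hres
  | succ f ih =>
    simp only [pvLoopB] at hres
    rcases (em (pvStep mask Z Y X o = o)) with he | he
    · rw [if_pos he] at hres
      exact h z y x hres
    · rw [if_neg he] at hres
      exact ih _ (fun z y x hh => pvStep_ub mask Z Y X o T hcl h z y x hh) hres
def pvTB (mask : List (List (List Bool))) (p : ℕ × ℕ × ℕ) : Bool :=
  pvGet3 (pvOutB mask) p.1 p.2.1 p.2.2

theorem pvOutB_shape (mask : List (List (List Bool))) :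
    pvShape (pvOutB mask) mask.length (pvDimY mask) (pvDimX mask) := by
  unfold pvOutB
  exact pvLoopB_shape mask _ _ _ _ _ (pvShape_mk _ _ _ _)
theorem pvOutB_closed (mask : List (List (List Bool))) :
    pvClosed mask mask.length (pvDimY mask) (pvDimX mask) (pvTB mask) := by
  constructor
  · rintro ⟨z, y, x⟩ ⟨⟨h1, h2, h3⟩, hbg, hb⟩
    have hb' : z = 0 ∨ z = mask.length - 1 ∨ y = 0 ∨ y = pvDimY mask - 1 ∨
        x = 0 ∨ x = pvDimX mask - 1 := hb
    have hbg' : pvGet3 mask z y x = false := hbg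
    have h1' : z < mask.length := h1
    have h2' : y < pvDimY mask := h2
    have h3' : x < pvDimX mask := h3
    unfold pvTB pvOutB
    apply pvLoopB_mono mask _ _ _ _ _ (pvShape_mk _ _ _ _)
    rw [pvGet3_mk, if_pos ⟨h1', h2', h3'⟩]
    simp only [Bool.and_eq_true, Bool.or_eq_true, Bool.not_eq_true', beq_iff_eq]
    exact ⟨hbg', by tauto⟩
  · rintro ⟨z, y, x⟩ q ⟨h1, h2, h3⟩ hbg hadj hq
    have hbg' : pvGet3 mask z y x = false := hbg
    have h1' : z < mask.length := h1
    have h2' : y < pvDimY mask := h2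
    have h3' : x < pvDimX mask := h3
    have hfix : pvStep mask mask.length (pvDimY mask) (pvDimX mask) (pvOutB mask) = pvOutB mask := by
      unfold pvOutB
      apply pvLoopB_fix mask _ _ _ _ _ (pvShape_mk _ _ _ _)
      have := pvFalseCount_le _ _ _ _ (pvShape_mk mask.length (pvDimY mask) (pvDimX mask)
        (fun z y x => !pvGet3 mask z y x &&
          (z == 0 || z == mask.length - 1 || y == 0 || y == pvDimY mask - 1 ||
           x == 0 || x == pvDimX mask - 1)))
      omega
    have hqin : pvInB mask.length (pvDimY mask) (pvDimX mask) q :=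
      pvGet3_true_inB _ _ _ _ _ _ _ (pvOutB_shape mask) hq
    unfold pvTB
    rw [← hfix]
    unfold pvStep
    rw [pvGet3_mk, if_pos ⟨h1', h2', h3'⟩]
    obtain ⟨hq1, hq2, hq3⟩ := hqin
    unfold pvTB at hq
    simp only [Bool.or_eq_true, Bool.and_eq_true, decide_eq_true_eq, Bool.not_eq_true']
    refine Or.inr ⟨hbg', ?_⟩
    have hadj' : (z = q.1 ∧ y = q.2.1 ∧ (x + 1 = q.2.2 ∨ q.2.2 + 1 = x)) ∨
        (z = q.1 ∧ x = q.2.2 ∧ (y + 1 = q.2.1 ∨ q.2.1 + 1 = y)) ∨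
        (y = q.2.1 ∧ x = q.2.2 ∧ (z + 1 = q.1 ∨ q.1 + 1 = z)) := hadj
    obtain ⟨a, b, c⟩ := q
    simp only at hadj' hq hq1 hq2 hq3
    rcases hadj' with ⟨e1, e2, e3 | e3⟩ | ⟨e1, e2, e3 | e3⟩ | ⟨e1, e2, e3 | e3⟩
    · exact Or.inr ⟨by omega, by rw [show z = a from e1, show y = b from e2, show x + 1 = c from e3]; exact hq⟩
    · refine Or.inl (Or.inr ⟨by omega, ?_⟩)
      rw [show z = a from e1, show y = b from e2, show x - 1 = c by omega]; exact hq
    · refine Or.inl (Or.inl (Or.inr ⟨by omega, ?_⟩))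
      rw [show z = a from e1, show y + 1 = b from e3, show x = c from e2]; exact hq
    · refine Or.inl (Or.inl (Or.inl (Or.inr ⟨by omega, ?_⟩)))
      rw [show z = a from e1, show y - 1 = b by omega, show x = c from e2]; exact hq
    · refine Or.inl (Or.inl (Or.inl (Or.inl (Or.inr ⟨by omega, ?_⟩))))
      rw [show z + 1 = a from e3, show y = b from e1, show x = c from e2]; exact hq
    · refine Or.inl (Or.inl (Or.inl (Or.inl (Or.inl ⟨by omega, ?_⟩))))
      rw [show z - 1 = a by omega, show y = b from e1, show x = c from e2]; exact hq
theorem pvOutB_ub (mask : List (List (List Bool))) (T : ℕ × ℕ × ℕ → Bool)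
    (hcl : pvClosed mask mask.length (pvDimY mask) (pvDimX mask) T) (p : ℕ × ℕ × ℕ)
    (h : pvTB mask p = true) : T p = true := by
  unfold pvTB pvOutB at h
  have := pvLoopB_ub mask mask.length (pvDimY mask) (pvDimX mask) _ _ T hcl
    (fun z y x hh => by
      rw [pvGet3_mk] at hh
      by_cases hin : z < mask.length ∧ y < pvDimY mask ∧ x < pvDimX mask
      · rw [if_pos hin] at hh
        simp only [Bool.and_eq_true, Bool.or_eq_true, Bool.not_eq_true', beq_iff_eq] at hh
        exact hcl.1 (z, y, x) ⟨hin, hh.1, by tauto⟩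
      · rw [if_neg hin] at hh; simp at hh)
    p.1 p.2.1 p.2.2 h
  simpa using this

-- ===== A-side lemmas =====

def pvFold (mask : List (List (List Bool))) (Z Y X : ℕ) (L : List (ℤ × ℤ × ℤ))
    (st : List (List (List Bool)) × List (ℕ × ℕ × ℕ)) :
    List (List (List Bool)) × List (ℕ × ℕ × ℕ) :=
  L.foldl (fun s n => pvPush mask Z Y X n s) st

def pvG (mask : List (List (List Bool))) (Z Y X : ℕ)
    (st : List (List (List Bool)) × List (ℕ × ℕ × ℕ)) : Prop :=
  ∀ p : ℕ × ℕ × ℕ, pvGet3 st.1 p.1 p.2.1 p.2.2 = true → p ∈ st.2 ∨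
    ∀ n, pvInB Z Y X n → pvBg mask n → pvAdj p n → pvGet3 st.1 n.1 n.2.1 n.2.2 = true

theorem pvAdj_symm (p q : ℕ × ℕ × ℕ) (h : pvAdj p q) : pvAdj q p := by
  unfold pvAdj at *; omega

theorem pvAdj_mem_nbrs (c n : ℕ × ℕ × ℕ) (Z Y X : ℕ) (hadj : pvAdj c n) (hn : pvInB Z Y X n) :
    ∃ cc ∈ pvNbrs c, pvValid Z Y X cc ∧ pvToN cc = n := by
  obtain ⟨cz, cy, cx⟩ := c
  obtain ⟨nz, ny, nx⟩ := n
  obtain ⟨hn1, hn2, hn3⟩ := hn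
  unfold pvAdj at hadj
  dsimp only at hadj hn1 hn2 hn3
  rcases hadj with ⟨e1, e2, e3 | e3⟩ | ⟨e1, e2, e3 | e3⟩ | ⟨e1, e2, e3 | e3⟩
  · exact ⟨((cz : ℤ), (cy : ℤ), (cx : ℤ) + 1), by simp [pvNbrs],
      by unfold pvValid; dsimp only; omega, by simp [pvToN, Prod.ext_iff]; omega⟩
  · exact ⟨((cz : ℤ), (cy : ℤ), (cx : ℤ) - 1), by simp [pvNbrs],
      by unfold pvValid; dsimp only; omega, by simp [pvToN, Prod.ext_iff]; omega⟩
  · exact ⟨((cz : ℤ), (cy : ℤ) + 1, (cx : ℤ)), by simp [pvNbrs],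
      by unfold pvValid; dsimp only; omega, by simp [pvToN, Prod.ext_iff]; omega⟩
  · exact ⟨((cz : ℤ), (cy : ℤ) - 1, (cx : ℤ)), by simp [pvNbrs],
      by unfold pvValid; dsimp only; omega, by simp [pvToN, Prod.ext_iff]; omega⟩
  · exact ⟨((cz : ℤ) + 1, (cy : ℤ), (cx : ℤ)), by simp [pvNbrs],
      by unfold pvValid; dsimp only; omega, by simp [pvToN, Prod.ext_iff]; omega⟩
  · exact ⟨((cz : ℤ) - 1, (cy : ℤ), (cx : ℤ)), by simp [pvNbrs],
      by unfold pvValid; dsimp only; omega, by simp [pvToN, Prod.ext_iff]; omega⟩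

theorem pvNbrs_adj (c : ℕ × ℕ × ℕ) (cc : ℤ × ℤ × ℤ) (Z Y X : ℕ)
    (hm : cc ∈ pvNbrs c) (hv : pvValid Z Y X cc) : pvAdj (pvToN cc) c := by
  obtain ⟨cz, cy, cx⟩ := c
  unfold pvValid at hv
  simp only [pvNbrs, List.mem_cons, List.not_mem_nil, or_false] at hm
  rcases hm with rfl | rfl | rfl | rfl | rfl | rfl <;>
    (unfold pvAdj pvToN; dsimp only at hv ⊢; omega)

-- push lemmas
theorem pvPush_shape (mask : List (List (List Bool))) (Z Y X : ℕ) (c : ℤ × ℤ × ℤ)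
    (st : List (List (List Bool)) × List (ℕ × ℕ × ℕ)) (hs : pvShape st.1 Z Y X) :
    pvShape (pvPush mask Z Y X c st).1 Z Y X := by
  unfold pvPush
  split
  · split
    · exact pvShape_set3 _ _ _ _ _ _ _ _ hs
    · exact hs
  · exact hs

theorem pvPush_mono (mask : List (List (List Bool))) (Z Y X : ℕ) (c : ℤ × ℤ × ℤ)
    (st : List (List (List Bool)) × List (ℕ × ℕ × ℕ)) (z y x : ℕ)
    (h : pvGet3 st.1 z y x = true) : pvGet3 (pvPush mask Z Y X c st).1 z y x = true := by
  unfold pvPush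
  split
  · split
    · rename_i hcnd
      by_cases he : c.1.toNat = z ∧ c.2.1.toNat = y ∧ c.2.2.toNat = x
      · obtain ⟨e1, e2, e3⟩ := he
        rw [e1, e2, e3] at hcnd
        rw [hcnd.2] at h
        simp at h
      · dsimp only
        rw [pvGet3_set3_ne _ _ _ _ _ _ _ _ he]
        exact h
    · exact h
  · exact h

theorem pvPush_queue_sub (mask : List (List (List Bool))) (Z Y X : ℕ) (c : ℤ × ℤ × ℤ)
    (st : List (List (List Bool)) × List (ℕ × ℕ × ℕ)) (p : ℕ × ℕ × ℕ) (h : p ∈ st.2) :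
    p ∈ (pvPush mask Z Y X c st).2 := by
  unfold pvPush
  split
  · split
    · simp [h]
    · exact h
  · exact h

theorem pvPush_origin (mask : List (List (List Bool))) (Z Y X : ℕ) (c : ℤ × ℤ × ℤ)
    (st : List (List (List Bool)) × List (ℕ × ℕ × ℕ)) (z y x : ℕ)
    (h : pvGet3 (pvPush mask Z Y X c st).1 z y x = true) :
    pvGet3 st.1 z y x = true ∨
      (pvValid Z Y X c ∧ pvBg mask (pvToN c) ∧ pvToN c = (z, y, x) ∧ (z, y, x) ∈ (pvPush mask Z Y X c st).2) := by
  unfold pvPush at h ⊢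
  split at h
  · rename_i hval
    split at h
    · rename_i hcnd
      by_cases he : c.1.toNat = z ∧ c.2.1.toNat = y ∧ c.2.2.toNat = x
      · refine Or.inr ⟨hval, ?_, ?_, ?_⟩
        · unfold pvBg pvToN
          exact hcnd.1
        · unfold pvToN
          simp [Prod.ext_iff, he.1, he.2.1, he.2.2]
        · simp only [if_pos hval, if_pos hcnd]
          simp [pvToN, Prod.ext_iff, he.1, he.2.1, he.2.2]
      · dsimp only at h
        rw [pvGet3_set3_ne _ _ _ _ _ _ _ _ he] at h
        exact Or.inl h
    · exact Or.inl h
  · exact Or.inl h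

theorem pvPush_queue_marked (mask : List (List (List Bool))) (Z Y X : ℕ) (c : ℤ × ℤ × ℤ)
    (st : List (List (List Bool)) × List (ℕ × ℕ × ℕ)) (hs : pvShape st.1 Z Y X)
    (h : ∀ p ∈ st.2, pvGet3 st.1 p.1 p.2.1 p.2.2 = true) :
    ∀ p ∈ (pvPush mask Z Y X c st).2, pvGet3 (pvPush mask Z Y X c st).1 p.1 p.2.1 p.2.2 = true := by
  intro p hp
  rcases (em (p ∈ st.2)) with hin | hnin
  · exact pvPush_mono mask Z Y X c st _ _ _ (h p hin)
  · unfold pvPush at hp ⊢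
    split at hp
    · rename_i hval
      split at hp
      · rename_i hcnd
        simp only [List.mem_append, List.mem_singleton] at hp
        rcases hp with hp | rfl
        · exact absurd hp hnin
        · dsimp only
          rw [if_pos hval, if_pos hcnd]
          dsimp only
          exact pvGet3_set3_self _ Z Y X _ _ _ _ hs (by omega) (by omega) (by omega)
      · exact absurd hp hnin
    · exact absurd hp hnin

theorem pvPush_measure (mask : List (List (List Bool))) (Z Y X : ℕ) (c : ℤ × ℤ × ℤ)
    (st : List (List (List Bool)) × List (ℕ × ℕ × ℕ)) (hs : pvShape st.1 Z Y X) :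
    (pvPush mask Z Y X c st).2.length + pvFalseCount (pvPush mask Z Y X c st).1 =
      st.2.length + pvFalseCount st.1 := by
  unfold pvPush
  split
  · rename_i hval
    split
    · rename_i hcnd
      dsimp only
      have := pvFalseCount_set3 st.1 Z Y X c.1.toNat c.2.1.toNat c.2.2.toNat hs
        (by omega) (by omega) (by omega) hcnd.2
      simp only [List.length_append, List.length_singleton]
      omega
    · rfl
  · rfl

theorem pvPush_marks (mask : List (List (List Bool))) (Z Y X : ℕ) (c : ℤ × ℤ × ℤ)
    (st : List (List (List Bool)) × List (ℕ × ℕ × ℕ)) (hs : pvShape st.1 Z Y X)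
    (hval : pvValid Z Y X c) (hbg : pvBg mask (pvToN c)) :
    pvGet3 (pvPush mask Z Y X c st).1 (pvToN c).1 (pvToN c).2.1 (pvToN c).2.2 = true := by
  unfold pvValid at hval
  unfold pvPush
  rw [if_pos hval]
  by_cases hm : pvGet3 st.1 c.1.toNat c.2.1.toNat c.2.2.toNat = false
  · rw [if_pos ⟨hbg, hm⟩]
    exact pvGet3_set3_self _ Z Y X _ _ _ _ hs (by omega) (by omega) (by omega)
  · rw [if_neg (by tauto)]
    unfold pvToN
    simpa using hm

theorem pvPush_ub (mask : List (List (List Bool))) (Z Y X : ℕ) (c : ℤ × ℤ × ℤ)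
    (st : List (List (List Bool)) × List (ℕ × ℕ × ℕ)) (T : ℕ × ℕ × ℕ → Bool)
    (hj : pvValid Z Y X c → pvBg mask (pvToN c) → T (pvToN c) = true)
    (hm : ∀ z y x, pvGet3 st.1 z y x = true → T (z, y, x) = true)
    (hq : ∀ p ∈ st.2, T p = true) :
    (∀ z y x, pvGet3 (pvPush mask Z Y X c st).1 z y x = true → T (z, y, x) = true) ∧
      (∀ p ∈ (pvPush mask Z Y X c st).2, T p = true) := by
  constructor
  · intro z y x h
    rcases pvPush_origin mask Z Y X c st z y x h with h | ⟨hval, hbg, heq, _⟩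
    · exact hm z y x h
    · rw [← heq]
      exact hj hval hbg
  · intro p hp
    unfold pvPush at hp
    split at hp
    · rename_i hval
      split at hp
      · rename_i hcnd
        simp only [List.mem_append, List.mem_singleton] at hp
        rcases hp with hp | rfl
        · exact hq p hp
        · exact hj hval hcnd.1
      · exact hq p hp
    · exact hq p hp

theorem pvPush_G (mask : List (List (List Bool))) (Z Y X : ℕ) (c : ℤ × ℤ × ℤ)
    (st : List (List (List Bool)) × List (ℕ × ℕ × ℕ)) (hG : pvG mask Z Y X st) :
    pvG mask Z Y X (pvPush mask Z Y X c st) := by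
  intro p hp
  rcases pvPush_origin mask Z Y X c st p.1 p.2.1 p.2.2 (by simpa using hp) with h | ⟨_, _, heq, hmem⟩
  · rcases hG p (by simpa using h) with hin | hcl
    · exact Or.inl (pvPush_queue_sub mask Z Y X c st p hin)
    · exact Or.inr fun n h1 h2 h3 => pvPush_mono mask Z Y X c st _ _ _ (hcl n h1 h2 h3)
  · exact Or.inl hmem

-- fold lemmas
theorem pvFold_shape (mask : List (List (List Bool))) (Z Y X : ℕ) (L : List (ℤ × ℤ × ℤ))
    (st : List (List (List Bool)) × List (ℕ × ℕ × ℕ)) (hs : pvShape st.1 Z Y X) :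
    pvShape (pvFold mask Z Y X L st).1 Z Y X := by
  induction L generalizing st with
  | nil => exact hs
  | cons c L ih => exact ih _ (pvPush_shape mask Z Y X c st hs)

theorem pvFold_mono (mask : List (List (List Bool))) (Z Y X : ℕ) (L : List (ℤ × ℤ × ℤ))
    (st : List (List (List Bool)) × List (ℕ × ℕ × ℕ)) (z y x : ℕ)
    (h : pvGet3 st.1 z y x = true) : pvGet3 (pvFold mask Z Y X L st).1 z y x = true := by
  induction L generalizing st with
  | nil => exact h
  | cons c L ih => exact ih _ (pvPush_mono mask Z Y X c st z y x h)

theorem pvFold_queue_sub (mask : List (List (List Bool))) (Z Y X : ℕ) (L : List (ℤ × ℤ × ℤ))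
    (st : List (List (List Bool)) × List (ℕ × ℕ × ℕ)) (p : ℕ × ℕ × ℕ) (h : p ∈ st.2) :
    p ∈ (pvFold mask Z Y X L st).2 := by
  induction L generalizing st with
  | nil => exact h
  | cons c L ih => exact ih _ (pvPush_queue_sub mask Z Y X c st p h)

theorem pvFold_measure (mask : List (List (List Bool))) (Z Y X : ℕ) (L : List (ℤ × ℤ × ℤ))
    (st : List (List (List Bool)) × List (ℕ × ℕ × ℕ)) (hs : pvShape st.1 Z Y X) :
    (pvFold mask Z Y X L st).2.length + pvFalseCount (pvFold mask Z Y X L st).1 =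
      st.2.length + pvFalseCount st.1 := by
  induction L generalizing st with
  | nil => rfl
  | cons c L ih =>
    have h1 := pvPush_measure mask Z Y X c st hs
    have h2 := ih (pvPush mask Z Y X c st) (pvPush_shape mask Z Y X c st hs)
    unfold pvFold at h2 ⊢
    simp only [List.foldl_cons]
    omega

theorem pvFold_queue_marked (mask : List (List (List Bool))) (Z Y X : ℕ) (L : List (ℤ × ℤ × ℤ))
    (st : List (List (List Bool)) × List (ℕ × ℕ × ℕ)) (hs : pvShape st.1 Z Y X)
    (h : ∀ p ∈ st.2, pvGet3 st.1 p.1 p.2.1 p.2.2 = true) :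
    ∀ p ∈ (pvFold mask Z Y X L st).2, pvGet3 (pvFold mask Z Y X L st).1 p.1 p.2.1 p.2.2 = true := by
  induction L generalizing st with
  | nil => exact h
  | cons c L ih =>
    exact ih _ (pvPush_shape mask Z Y X c st hs) (pvPush_queue_marked mask Z Y X c st hs h)

theorem pvFold_origin (mask : List (List (List Bool))) (Z Y X : ℕ) (L : List (ℤ × ℤ × ℤ))
    (st : List (List (List Bool)) × List (ℕ × ℕ × ℕ)) (z y x : ℕ)
    (h : pvGet3 (pvFold mask Z Y X L st).1 z y x = true) :
    pvGet3 st.1 z y x = true ∨ (z, y, x) ∈ (pvFold mask Z Y X L st).2 := by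
  induction L generalizing st with
  | nil => exact Or.inl h
  | cons c L ih =>
    rcases ih (pvPush mask Z Y X c st) h with h | h
    · rcases pvPush_origin mask Z Y X c st z y x h with h | ⟨_, _, _, hmem⟩
      · exact Or.inl h
      · exact Or.inr (pvFold_queue_sub mask Z Y X L _ _ hmem)
    · exact Or.inr h

theorem pvFold_marks (mask : List (List (List Bool))) (Z Y X : ℕ) (L : List (ℤ × ℤ × ℤ))
    (st : List (List (List Bool)) × List (ℕ × ℕ × ℕ)) (hs : pvShape st.1 Z Y X)
    (c : ℤ × ℤ × ℤ) (hc : c ∈ L) (hval : pvValid Z Y X c) (hbg : pvBg mask (pvToN c)) :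
    pvGet3 (pvFold mask Z Y X L st).1 (pvToN c).1 (pvToN c).2.1 (pvToN c).2.2 = true := by
  induction L generalizing st with
  | nil => simp at hc
  | cons d L ih =>
    rcases List.mem_cons.mp hc with rfl | hc
    · exact pvFold_mono mask Z Y X L _ _ _ _ (pvPush_marks mask Z Y X c st hs hval hbg)
    · exact ih _ (pvPush_shape mask Z Y X d st hs) hc

theorem pvFold_ub (mask : List (List (List Bool))) (Z Y X : ℕ) (L : List (ℤ × ℤ × ℤ))
    (st : List (List (List Bool)) × List (ℕ × ℕ × ℕ)) (T : ℕ × ℕ × ℕ → Bool)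
    (hj : ∀ c ∈ L, pvValid Z Y X c → pvBg mask (pvToN c) → T (pvToN c) = true)
    (hm : ∀ z y x, pvGet3 st.1 z y x = true → T (z, y, x) = true)
    (hq : ∀ p ∈ st.2, T p = true) :
    (∀ z y x, pvGet3 (pvFold mask Z Y X L st).1 z y x = true → T (z, y, x) = true) ∧
      (∀ p ∈ (pvFold mask Z Y X L st).2, T p = true) := by
  induction L generalizing st with
  | nil => exact ⟨hm, hq⟩
  | cons c L ih =>
    have hp := pvPush_ub mask Z Y X c st T (hj c (by simp)) hm hq
    exact ih _ (fun d hd => hj d (by simp [hd])) hp.1 hp.2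

theorem pvFold_G (mask : List (List (List Bool))) (Z Y X : ℕ) (L : List (ℤ × ℤ × ℤ))
    (st : List (List (List Bool)) × List (ℕ × ℕ × ℕ)) (hG : pvG mask Z Y X st) :
    pvG mask Z Y X (pvFold mask Z Y X L st) := by
  induction L generalizing st with
  | nil => exact hG
  | cons c L ih => exact ih _ (pvPush_G mask Z Y X c st hG)


-- BFS master lemma: with sufficient fuel the loop drains the queue, grows the marking
-- monotonically, and leaves it closed under background adjacency
theorem pvBfs_main (mask : List (List (List Bool))) (Z Y X : ℕ) :
    ∀ (f : ℕ) (st : List (List (List Bool)) × List (ℕ × ℕ × ℕ)),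
      pvShape st.1 Z Y X →
      st.2.length + pvFalseCount st.1 < f →
      (∀ p ∈ st.2, pvGet3 st.1 p.1 p.2.1 p.2.2 = true) →
      pvG mask Z Y X st →
      pvShape (pvBfs mask Z Y X f st) Z Y X ∧
      (∀ z y x, pvGet3 st.1 z y x = true → pvGet3 (pvBfs mask Z Y X f st) z y x = true) ∧
      (∀ p : ℕ × ℕ × ℕ, pvGet3 (pvBfs mask Z Y X f st) p.1 p.2.1 p.2.2 = true →
        ∀ n, pvInB Z Y X n → pvBg mask n → pvAdj p n →
          pvGet3 (pvBfs mask Z Y X f st) n.1 n.2.1 n.2.2 = true) := by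
  intro f
  induction f with
  | zero => intro st _ hm _ _; omega
  | succ f ih =>
    rintro ⟨o, q⟩ hs hm hq hG
    cases q with
    | nil =>
      refine ⟨hs, fun _ _ _ h => h, ?_⟩
      intro p hp n h1 h2 h3
      rcases hG p hp with hin | hcl
      · simp at hin
      · exact hcl n h1 h2 h3
    | cons c rest =>
      have hred : pvBfs mask Z Y X (f + 1) (o, c :: rest) =
          pvBfs mask Z Y X f (pvFold mask Z Y X (pvNbrs c) (o, rest)) := rfl
      set st' := pvFold mask Z Y X (pvNbrs c) (o, rest) with hst'
      have hs1 : pvShape (o, rest).1 Z Y X := hs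
      have hshape' : pvShape st'.1 Z Y X := pvFold_shape mask Z Y X _ _ hs1
      have hmeas : st'.2.length + pvFalseCount st'.1 = rest.length + pvFalseCount o :=
        pvFold_measure mask Z Y X _ _ hs1
      have hmlt : st'.2.length + pvFalseCount st'.1 < f := by
        simp only [List.length_cons] at hm
        omega
      have hqm : ∀ p ∈ st'.2, pvGet3 st'.1 p.1 p.2.1 p.2.2 = true :=
        pvFold_queue_marked mask Z Y X _ _ hs1
          (fun p hp => hq p (List.mem_cons_of_mem c hp))
      have hcmarked : pvGet3 o c.1 c.2.1 c.2.2 = true := hq c List.mem_cons_self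
      have hG' : pvG mask Z Y X st' := by
        intro p hp
        by_cases hpq : p ∈ st'.2
        · exact Or.inl hpq
        · have hpo : pvGet3 (o, rest).1 p.1 p.2.1 p.2.2 = true := by
            rcases pvFold_origin mask Z Y X _ _ _ _ _ hp with h | h
            · exact h
            · exact absurd h hpq
          rcases hG p hpo with hin | hcl
          · rcases List.mem_cons.mp hin with rfl | hin
            · refine Or.inr ?_
              intro n h1 h2 h3
              obtain ⟨cc, hccm, hccv, hcceq⟩ := pvAdj_mem_nbrs p n Z Y X h3 h1
              have := pvFold_marks mask Z Y X (pvNbrs p) (o, rest) hs1 cc hccm hccv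
                (by rw [hcceq]; exact h2)
              rw [hcceq] at this
              exact this
            · exact absurd (pvFold_queue_sub mask Z Y X _ _ _ hin) hpq
          · exact Or.inr fun n h1 h2 h3 => pvFold_mono mask Z Y X _ _ _ _ _ (hcl n h1 h2 h3)
      obtain ⟨ra, rb, rc⟩ := ih st' hshape' hmlt hqm hG'
      refine ⟨by rw [hred]; exact ra, ?_, by rw [hred]; exact rc⟩
      intro z y x h
      rw [hred]
      exact rb z y x (pvFold_mono mask Z Y X _ _ _ _ _ h)

theorem pvBfs_ub (mask : List (List (List Bool))) (Z Y X : ℕ) (T : ℕ × ℕ × ℕ → Bool)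
    (hcl : pvClosed mask Z Y X T) :
    ∀ (f : ℕ) (st : List (List (List Bool)) × List (ℕ × ℕ × ℕ)),
      (∀ z y x, pvGet3 st.1 z y x = true → T (z, y, x) = true) →
      (∀ p ∈ st.2, T p = true) →
      ∀ z y x, pvGet3 (pvBfs mask Z Y X f st) z y x = true → T (z, y, x) = true := by
  intro f
  induction f with
  | zero => intro st hm _ z y x h; exact hm z y x h
  | succ f ih =>
    rintro ⟨o, q⟩ hm hq
    cases q with
    | nil => exact hm
    | cons c rest =>
      have hred : pvBfs mask Z Y X (f + 1) (o, c :: rest) =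
          pvBfs mask Z Y X f (pvFold mask Z Y X (pvNbrs c) (o, rest)) := rfl
      have hj : ∀ cc ∈ pvNbrs c, pvValid Z Y X cc → pvBg mask (pvToN cc) →
          T (pvToN cc) = true := by
        intro cc hccm hv hbg
        refine hcl.2 (pvToN cc) c ?_ hbg (pvNbrs_adj c cc Z Y X hccm hv)
          (hq c List.mem_cons_self)
        unfold pvValid at hv
        unfold pvToN pvInB
        dsimp only
        omega
      have hfold := pvFold_ub mask Z Y X (pvNbrs c) (o, rest) T hj hm
        (fun p hp => hq p (List.mem_cons_of_mem c hp))
      intro z y x h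
      rw [hred] at h
      exact ih _ hfold.1 hfold.2 z y x h

-- the seeding pass covers exactly the boundary cells
theorem pvSeedCalls_complete (Z Y X : ℕ) (p : ℕ × ℕ × ℕ) (hin : pvInB Z Y X p)
    (hb : p.1 = 0 ∨ p.1 = Z - 1 ∨ p.2.1 = 0 ∨ p.2.1 = Y - 1 ∨ p.2.2 = 0 ∨ p.2.2 = X - 1) :
    ∃ c ∈ pvSeedCalls Z Y X, pvValid Z Y X c ∧ pvToN c = p := by
  obtain ⟨z, y, x⟩ := p
  obtain ⟨h1, h2, h3⟩ := hin
  dsimp only at h1 h2 h3 hb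
  unfold pvSeedCalls
  rcases hb with hc | hc | hc | hc | hc | hc
  · refine ⟨(0, (y : ℤ), (x : ℤ)), List.mem_append.mpr (Or.inr (List.mem_flatMap.mpr
      ⟨y, List.mem_range.mpr h2, List.mem_flatMap.mpr ⟨x, List.mem_range.mpr h3, by simp⟩⟩)),
      by unfold pvValid; dsimp only; omega, by simp [pvToN, Prod.ext_iff]; omega⟩
  · refine ⟨((Z : ℤ) - 1, (y : ℤ), (x : ℤ)), List.mem_append.mpr (Or.inr (List.mem_flatMap.mpr
      ⟨y, List.mem_range.mpr h2, List.mem_flatMap.mpr ⟨x, List.mem_range.mpr h3, by simp⟩⟩)),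
      by unfold pvValid; dsimp only; omega, by simp [pvToN, Prod.ext_iff]; omega⟩
  · refine ⟨((z : ℤ), 0, (x : ℤ)), List.mem_append.mpr (Or.inl (List.mem_flatMap.mpr
      ⟨z, List.mem_range.mpr h1, List.mem_append.mpr (Or.inr (List.mem_flatMap.mpr
        ⟨x, List.mem_range.mpr h3, by simp⟩))⟩)),
      by unfold pvValid; dsimp only; omega, by simp [pvToN, Prod.ext_iff]; omega⟩
  · refine ⟨((z : ℤ), (Y : ℤ) - 1, (x : ℤ)), List.mem_append.mpr (Or.inl (List.mem_flatMap.mpr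
      ⟨z, List.mem_range.mpr h1, List.mem_append.mpr (Or.inr (List.mem_flatMap.mpr
        ⟨x, List.mem_range.mpr h3, by simp⟩))⟩)),
      by unfold pvValid; dsimp only; omega, by simp [pvToN, Prod.ext_iff]; omega⟩
  · refine ⟨((z : ℤ), (y : ℤ), 0), List.mem_append.mpr (Or.inl (List.mem_flatMap.mpr
      ⟨z, List.mem_range.mpr h1, List.mem_append.mpr (Or.inl (List.mem_flatMap.mpr
        ⟨y, List.mem_range.mpr h2, by simp⟩))⟩)),
      by unfold pvValid; dsimp only; omega, by simp [pvToN, Prod.ext_iff]; omega⟩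
  · refine ⟨((z : ℤ), (y : ℤ), (X : ℤ) - 1), List.mem_append.mpr (Or.inl (List.mem_flatMap.mpr
      ⟨z, List.mem_range.mpr h1, List.mem_append.mpr (Or.inl (List.mem_flatMap.mpr
        ⟨y, List.mem_range.mpr h2, by simp⟩))⟩)),
      by unfold pvValid; dsimp only; omega, by simp [pvToN, Prod.ext_iff]; omega⟩

theorem pvSeedCalls_sound (Z Y X : ℕ) (c : ℤ × ℤ × ℤ) (hc : c ∈ pvSeedCalls Z Y X)
    (hv : pvValid Z Y X c) :
    (pvToN c).1 = 0 ∨ (pvToN c).1 = Z - 1 ∨ (pvToN c).2.1 = 0 ∨ (pvToN c).2.1 = Y - 1 ∨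
      (pvToN c).2.2 = 0 ∨ (pvToN c).2.2 = X - 1 := by
  unfold pvValid at hv
  unfold pvSeedCalls at hc
  simp only [List.mem_append, List.mem_flatMap, List.mem_range, List.mem_cons,
    List.not_mem_nil, or_false] at hc
  rcases hc with ⟨z, hz, ⟨y, hy, rfl | rfl⟩ | ⟨x, hx, rfl | rfl⟩⟩ | ⟨y, hy, x, hx, rfl | rfl⟩ <;>
    (unfold pvToN; dsimp only at hv ⊢; omega)

-- assembled properties of A's outside grid
def pvTA (mask : List (List (List Bool))) (p : ℕ × ℕ × ℕ) : Bool :=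
  pvGet3 (pvOutA mask) p.1 p.2.1 p.2.2

theorem pvOutA_props (mask : List (List (List Bool))) :
    pvClosed mask mask.length (pvDimY mask) (pvDimX mask) (pvTA mask) ∧
      (∀ T, pvClosed mask mask.length (pvDimY mask) (pvDimX mask) T →
        ∀ p : ℕ × ℕ × ℕ, pvTA mask p = true → T p = true) := by
  set Z := mask.length
  set Y := pvDimY mask
  set X := pvDimX mask
  have hst0 : pvShape (pvMk Z Y X fun _ _ _ => false) Z Y X := pvShape_mk Z Y X _
  have hzero : ∀ z y x, pvGet3 (pvMk Z Y X fun _ _ _ => false) z y x = false := by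
    intro z y x
    rw [pvGet3_mk]
    split <;> rfl
  set st0 : List (List (List Bool)) × List (ℕ × ℕ × ℕ) :=
    (pvMk Z Y X fun _ _ _ => false, []) with hst0def
  set stS := pvFold mask Z Y X (pvSeedCalls Z Y X) st0 with hstS
  have hOA : pvOutA mask = pvBfs mask Z Y X (stS.2.length + Z * Y * X + 1) stS := rfl
  have hshapeS : pvShape stS.1 Z Y X := pvFold_shape mask Z Y X _ _ hst0
  have hmeas : stS.2.length + pvFalseCount stS.1 < stS.2.length + Z * Y * X + 1 := by
    have := pvFalseCount_le stS.1 Z Y X hshapeS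
    omega
  have hqm : ∀ p ∈ stS.2, pvGet3 stS.1 p.1 p.2.1 p.2.2 = true :=
    pvFold_queue_marked mask Z Y X _ _ hst0 (by intro p hp; simp [hst0def] at hp)
  have hG0 : pvG mask Z Y X st0 := by
    intro p hp
    rw [hzero] at hp
    simp at hp
  have hGS : pvG mask Z Y X stS := pvFold_G mask Z Y X _ _ hG0
  obtain ⟨hshA, hmonA, hclA⟩ := pvBfs_main mask Z Y X (stS.2.length + Z * Y * X + 1) stS
    hshapeS hmeas hqm hGS
  constructor
  · constructor
    · rintro p ⟨hin, hbg, hb⟩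
      obtain ⟨c, hcm, hcv, hceq⟩ := pvSeedCalls_complete Z Y X p hin hb
      have hmk := pvFold_marks mask Z Y X _ st0 hst0 c hcm hcv (by rw [hceq]; exact hbg)
      rw [hceq] at hmk
      unfold pvTA
      rw [hOA]
      exact hmonA p.1 p.2.1 p.2.2 hmk
    · intro p q hin hbg hadj hTq
      unfold pvTA at hTq ⊢
      rw [hOA] at hTq ⊢
      exact hclA q hTq p hin hbg (pvAdj_symm p q hadj)
  · intro T hcl p hp
    have hj : ∀ c ∈ pvSeedCalls Z Y X, pvValid Z Y X c → pvBg mask (pvToN c) →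
        T (pvToN c) = true := by
      intro c hcm hv hbg
      refine hcl.1 (pvToN c) ⟨?_, hbg, pvSeedCalls_sound Z Y X c hcm hv⟩
      unfold pvValid at hv
      unfold pvToN pvInB
      dsimp only
      omega
    have hfold := pvFold_ub mask Z Y X (pvSeedCalls Z Y X) st0 T hj
      (fun z y x h => by rw [hzero] at h; simp at h)
      (by intro p hp; simp [hst0def] at hp)
    unfold pvTA at hp
    rw [hOA] at hp
    exact pvBfs_ub mask Z Y X T hcl _ stS hfold.1 hfold.2 p.1 p.2.1 p.2.2 hp

-- the two outside grids agree pointwise, hence the filled outputs agree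
theorem pvOut_eq (mask : List (List (List Bool))) (p : ℕ × ℕ × ℕ) :
    pvTA mask p = pvTB mask p := by
  obtain ⟨hclA, hubA⟩ := pvOutA_props mask
  rcases hb : pvTB mask p with hfalse | htrue
  · rcases ha : pvTA mask p
    · rfl
    · exact absurd (hubA (pvTB mask) (pvOutB_closed mask) p ha) (by simp [hb])
  · exact pvOutB_ub mask (pvTA mask) hclA p hb

theorem pvMain (mask : List (List (List Bool))) :
    fill_holes_binary mask = fill_holes_binary_alt mask := by
  have h : ∀ z y x, pvGet3 (pvOutA mask) z y x = pvGet3 (pvOutB mask) z y x := by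
    intro z y x
    have := pvOut_eq mask (z, y, x)
    unfold pvTA pvTB at this
    exact this
  show pvMk mask.length (pvDimY mask) (pvDimX mask)
      (fun z y x => pvGet3 mask z y x || !pvGet3 (pvOutA mask) z y x) =
    pvMk mask.length (pvDimY mask) (pvDimX mask)
      (fun z y x => pvGet3 mask z y x || !pvGet3 (pvOutB mask) z y x)
  rw [show (fun z y x => pvGet3 mask z y x || !pvGet3 (pvOutA mask) z y x) =
      (fun z y x => pvGet3 mask z y x || !pvGet3 (pvOutB mask) z y x) from
    funext fun z => funext fun y => funext fun x => by rw [h z y x]]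

-- ===== VERDICT (by name: the statement is the Claim_ definition above) =====
theorem fill_holes_binary_spec : Claim_equal_fill_holes_binary := by
  intro mask _ _
  exact pvMain mask
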